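-- pv_equiv track=rewrite | github.com/ailabx/ailabx | quant/engine/feature_parser.py | extra_features
-- ===== SOURCE A (Python) =====
-- def extra_features(items):
--         features = []
--         temps = []
--         funcs = ['rank','cross']
--         for item in items:
--             temp = ''
--             for c in item:
--                 if c in ['+','-','*','/',',','(',')']:
--                     if len(temp)>0 and temp not in temps and temp not in funcs:
--                         temps.append(temp.strip())
--                     temp = ''
--                 else:
--                     temp += c
--             if len(temp) > 0 and temp not in temps and temp not in funcs:
--                 temps.append(temp.strip())
--         return temps
-- ===== SOURCE B (Python) =====
-- def extra_features(items):
--     funcs = ('rank', 'cross')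
--     table = str.maketrans('+-*/,()', '\0' * 7)
--     temps = []
--     for item in items:
--         for t in item.translate(table).split('\0'):
--             if t and t not in temps and t not in funcs:
--                 temps.append(t.strip())
--     return temps
-- ===== Notes on version B (the rewrite author's own statement) =====
-- stated objective: idiomatic
-- what changed: Replaces the hand-rolled character state machine (buffer grown char by char, flushed at each delimiter) by translating all seven delimiters to one sentinel character, splitting with str.split, and filtering the tokens in a separate pass; the unstripped-membership/stripped-append asymmetry of A is preserved exactly.
import Mathlib
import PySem

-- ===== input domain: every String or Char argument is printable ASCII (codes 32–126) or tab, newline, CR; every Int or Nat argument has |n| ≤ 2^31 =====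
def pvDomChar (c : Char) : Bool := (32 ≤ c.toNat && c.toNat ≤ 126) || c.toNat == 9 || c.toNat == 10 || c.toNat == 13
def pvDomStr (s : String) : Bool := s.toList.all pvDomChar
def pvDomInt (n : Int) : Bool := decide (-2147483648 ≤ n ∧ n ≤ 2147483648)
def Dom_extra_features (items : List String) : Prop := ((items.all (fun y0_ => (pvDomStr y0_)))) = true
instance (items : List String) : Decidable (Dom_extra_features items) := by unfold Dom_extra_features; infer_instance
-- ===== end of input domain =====

-- B replaces A's character-by-character buffer state machine by translating every
-- delimiter to one sentinel character, library-splitting on it, and filtering the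
-- resulting tokens in a single separate pass (objective: idiomatic; same cost).

-- ===== PORT A =====
def pvFuncsA : List (List Char) := [['r','a','n','k'], ['c','r','o','s','s']]

-- the repeated flush: `if len(temp)>0 and temp not in temps and temp not in funcs: temps.append(temp.strip())`
def pvFlushA (st : List (List Char) × List Char) : List (List Char) :=
  if st.2.length > 0 ∧ st.2 ∉ st.1 ∧ st.2 ∉ pvFuncsA then st.1 ++ [PySem.Chars.strip st.2] else st.1

def pvStepA (st : List (List Char) × List Char) (c : Char) : List (List Char) × List Char :=
  if c ∈ ['+','-','*','/',',','(',')'] then (pvFlushA st, []) else (st.1, st.2 ++ [c])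

def pvItemA (temps : List (List Char)) (item : List Char) : List (List Char) :=
  pvFlushA (item.foldl pvStepA (temps, []))

def extra_features (items : List String) : List String :=
  (items.foldl (fun temps item => pvItemA temps item.toList) []).map String.ofList

-- ===== PORT B =====
def pvFuncsB : List (List Char) := [['r','a','n','k'], ['c','r','o','s','s']]

-- str.maketrans('+-*/,()', '\0'*7) / translate, as a character map
def pvTr (c : Char) : Char := if c ∈ ['+','-','*','/',',','(',')'] then '\x00' else c

-- `if t and t not in temps and t not in funcs: temps.append(t.strip())`
def pvKeep (temps : List (List Char)) (t : List Char) : List (List Char) :=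
  if t ≠ [] ∧ t ∉ temps ∧ t ∉ pvFuncsB then temps ++ [PySem.Chars.strip t] else temps

def extra_features_alt (items : List String) : List String :=
  (items.foldl
      (fun temps item => ((item.toList.map pvTr).splitOn '\x00').foldl pvKeep temps)
      []).map String.ofList

-- ===== PRECONDITION & SPEC =====
def Spec_extra_features (items : List String) (out : List String) : Prop := out = extra_features_alt items
instance (items : List String) (out : List String) : Decidable (Spec_extra_features items out) := by unfold Spec_extra_features; infer_instance

-- ===== CLAIM (what is proved, stated in full; the proofs are below) =====
def Claim_equal_extra_features : Prop := ∀ (items : List String), Dom_extra_features items → Spec_extra_features items (extra_features items)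

-- ===== LEMMAS AND PROOFS =====

lemma pvKeep_eq_flush (temps : List (List Char)) (buf : List Char) :
    pvKeep temps buf = pvFlushA (temps, buf) := by
  simp [pvKeep, pvFlushA, pvFuncsA, pvFuncsB, List.length_pos_iff]

-- A's scan of one item, started with buffer `buf`, equals B's token pass where the
-- first token is prefixed by `buf`.
lemma pvScan_eq (cs : List Char) (h : '\x00' ∉ cs) :
    ∀ (temps : List (List Char)) (buf : List Char),
      pvFlushA (cs.foldl pvStepA (temps, buf))
        = (((cs.map pvTr).splitOn '\x00').modifyHead (fun t => buf ++ t)).foldl pvKeep temps := by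
  induction cs with
  | nil =>
    intro temps buf
    simp [List.splitOn, List.splitOnP_nil, pvKeep_eq_flush]
  | cons c cs ih =>
    intro temps buf
    have hc : c ≠ '\x00' := fun hcc => h (hcc ▸ List.mem_cons_self ..)
    have hcs : '\x00' ∉ cs := fun hm => h (List.mem_cons_of_mem _ hm)
    by_cases hd : c ∈ ['+','-','*','/',',','(',')']
    · have htr : pvTr c = '\x00' := by simp [pvTr, hd]
      simp only [List.map_cons, htr, List.splitOn, List.splitOnP_cons, beq_self_eq_true,
        if_pos, List.foldl_cons, pvStepA, hd, List.modifyHead_cons]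
      rw [ih hcs (pvFlushA (temps, buf)) []]
      simp [List.splitOn, pvKeep_eq_flush]
      exact congrArg _ (congrFun List.modifyHead_id _)
    · have htr : pvTr c = c := by simp [pvTr, hd]
      have hne : (c == '\x00') = false := by simp [hc]
      simp only [List.map_cons, htr, List.splitOn, List.splitOnP_cons, hne, Bool.false_eq_true,
        if_false, List.modifyHead_modifyHead, List.foldl_cons, pvStepA, hd]
      rw [ih hcs temps (buf ++ [c])]
      congr 1
      simp only [List.splitOn]
      congr 1
      funext t
      simp

lemma pvItem_eq (item : List Char) (h : '\x00' ∉ item) (temps : List (List Char)) :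
    pvItemA temps item = ((item.map pvTr).splitOn '\x00').foldl pvKeep temps := by
  unfold pvItemA
  rw [pvScan_eq item h temps []]
  congr 1
  have : (fun t : List Char => ([] : List Char) ++ t) = id := by funext t; simp
  rw [this, List.modifyHead_id, id_eq]

lemma pvNul_not_mem (s : String) (h : pvDomStr s = true) : '\x00' ∉ s.toList := by
  intro hm
  have := List.all_eq_true.mp h _ hm
  simp [pvDomChar] at this

lemma pvFold_eq (items : List String) (h : items.all (fun s => pvDomStr s) = true) :
    ∀ temps : List (List Char),
      items.foldl (fun temps item => pvItemA temps item.toList) temps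
        = items.foldl (fun temps item => ((item.toList.map pvTr).splitOn '\x00').foldl pvKeep temps) temps := by
  induction items with
  | nil => intro temps; rfl
  | cons s rest ih =>
    intro temps
    simp only [List.all_cons, Bool.and_eq_true] at h
    simp only [List.foldl_cons]
    rw [pvItem_eq s.toList (pvNul_not_mem s h.1) temps]
    exact ih h.2 _

-- ===== VERDICT (by name: the statement is the Claim_ definition above) =====
theorem extra_features_spec : Claim_equal_extra_features := by
  intro items hdom
  unfold Spec_extra_features extra_features extra_features_alt
  rw [pvFold_eq items hdom []]
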